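-- pv_equiv track=rewrite | github.com/rodcoelho/python-practice | archived_problems/three_consecutive_nums_w_unit_tests.py | find_consecutive_runs
-- ===== SOURCE A (Python) =====
-- def find_consecutive_runs(input_array):
--     payload = []
--
--     for i in range(0, len(input_array)):
--         try:
--             # check if ascending
--             if input_array[i] == input_array[i + 1] + 1:
--                 if input_array[i] == input_array[i + 2] + 2:
--                     payload.append(i)
--         except:
--             pass
--     for i in range(0, len(input_array)):
--         try:
--             # check if descending
--             if input_array[i] == input_array[i + 1] - 1:
--                 if input_array[i] == input_array[i + 2] - 2:
--                     payload.append(i)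
--         except:
--             pass
--     if not payload:
--         return [0]
--     else:
--         return sorted(payload)
-- ===== SOURCE B (Python) =====
-- def find_consecutive_runs(input_array):
--     runs = []
--     for i in range(len(input_array) - 2):
--         d = input_array[i + 1] - input_array[i]
--         if (d == 1 or d == -1) and input_array[i + 2] - input_array[i + 1] == d:
--             runs.append(i)
--     return runs if runs else [0]
-- ===== Notes on version B (the rewrite author's own statement) =====
-- stated objective: simpler
-- what changed: Replaces A's two full scans with try/except plus a final sort by one bounded pass over range(len-2) testing a common-difference condition; the collected indices are already ascending so the sort and the exception handling disappear.
import Mathlib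
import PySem

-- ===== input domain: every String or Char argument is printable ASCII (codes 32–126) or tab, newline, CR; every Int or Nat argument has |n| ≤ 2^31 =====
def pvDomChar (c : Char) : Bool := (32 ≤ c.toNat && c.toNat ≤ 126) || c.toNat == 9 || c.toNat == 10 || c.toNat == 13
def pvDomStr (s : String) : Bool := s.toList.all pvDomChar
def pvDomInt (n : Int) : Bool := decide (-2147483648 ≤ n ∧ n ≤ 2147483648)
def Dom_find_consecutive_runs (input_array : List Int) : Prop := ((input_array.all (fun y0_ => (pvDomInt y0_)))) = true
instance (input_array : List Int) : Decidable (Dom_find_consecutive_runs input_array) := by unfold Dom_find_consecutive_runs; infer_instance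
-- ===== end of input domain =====

-- B replaces A's two full scans + try/except + final sort with one bounded pass whose
-- output is already sorted (no sort call); return values only, no mutation.

-- ===== PORT A =====
-- the try-block of A's first loop: append iff all three indexings succeed and both tests hold
def pvTryAsc (xs : List Int) (i : Int) : Bool :=
  match PySem.List.pyGet? xs i, PySem.List.pyGet? xs (i + 1) with
  | some a, some b =>
    if a = b + 1 then
      match PySem.List.pyGet? xs (i + 2) with
      | some c => a = c + 2
      | none => false
    else false
  | _, _ => false

-- the try-block of A's second loop
def pvTryDesc (xs : List Int) (i : Int) : Bool :=
  match PySem.List.pyGet? xs i, PySem.List.pyGet? xs (i + 1) with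
  | some a, some b =>
    if a = b - 1 then
      match PySem.List.pyGet? xs (i + 2) with
      | some c => a = c - 2
      | none => false
    else false
  | _, _ => false

-- payload after A's two loops (asc loop from [], then desc loop continuing on it)
def pvPayload (xs : List Int) : List Int :=
  (PySem.List.pyRange 0 (xs.length : Int) 1).foldl
    (fun acc i => if pvTryDesc xs i then acc ++ [i] else acc)
    ((PySem.List.pyRange 0 (xs.length : Int) 1).foldl
      (fun acc i => if pvTryAsc xs i then acc ++ [i] else acc) [])

def find_consecutive_runs (input_array : List Int) : List Int :=
  if pvPayload input_array = [] then [0]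
  else PySem.List.sorted (pvPayload input_array) (fun x => x) false

-- ===== PORT B =====
-- B's per-index test: common difference d = ±1 between the three elements
def pvRunAt (xs : List Int) (i : Int) : Bool :=
  let d := PySem.List.pyGetD xs (i + 1) 0 - PySem.List.pyGetD xs i 0
  (d == 1 || d == -1) && (PySem.List.pyGetD xs (i + 2) 0 - PySem.List.pyGetD xs (i + 1) 0 == d)

-- runs collected by B's single bounded pass
def pvRuns (xs : List Int) : List Int :=
  (PySem.List.pyRange 0 ((xs.length : Int) - 2) 1).foldl
    (fun acc i => if pvRunAt xs i then acc ++ [i] else acc) []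

def find_consecutive_runs_alt (input_array : List Int) : List Int :=
  if pvRuns input_array = [] then [0] else pvRuns input_array

-- ===== PRECONDITION & SPEC =====
def Spec_find_consecutive_runs (input_array : List Int) (out : List Int) : Prop := out = find_consecutive_runs_alt input_array
instance (input_array : List Int) (out : List Int) : Decidable (Spec_find_consecutive_runs input_array out) := by unfold Spec_find_consecutive_runs; infer_instance

-- ===== CLAIM (what is proved, stated in full; the proofs are below) =====
def Claim_equal_find_consecutive_runs : Prop := ∀ (input_array : List Int), Dom_find_consecutive_runs input_array → Spec_find_consecutive_runs input_array (find_consecutive_runs input_array)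

-- ===== LEMMAS AND PROOFS =====

-- a predicate false from n-2 on filters a range(0,n) the same as range(0,n-2)
lemma filter_pyRange_shrink (p : Int → Bool) (n : Int)
    (h : ∀ i, n - 2 ≤ i → p i = false) :
    (PySem.List.pyRange 0 n 1).filter p = (PySem.List.pyRange 0 (n - 2) 1).filter p := by
  by_cases hle : n - 2 ≤ 0
  · rw [PySem.List.pyRange_one_eq_nil hle]
    simp only [List.filter_nil]
    rw [List.filter_eq_nil_iff]
    intro i hi
    rw [PySem.List.mem_pyRange_one] at hi
    simp [h i (by omega)]
  · rw [PySem.List.pyRange_one_append 0 (n - 2) n (by omega) (by omega), List.filter_append]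
    have : (PySem.List.pyRange (n - 2) n 1).filter p = [] := by
      rw [List.filter_eq_nil_iff]
      intro i hi
      rw [PySem.List.mem_pyRange_one] at hi
      simp [h i (by omega)]
    simp [this]

-- mutually exclusive tests: filter of the disjunction is a permutation of the two filters
lemma filter_or_perm {α : Type} (p q : α → Bool) (h : ∀ x, p x = true → q x = false) :
    ∀ l : List α, (l.filter (fun x => p x || q x)).Perm (l.filter p ++ l.filter q)
  | [] => by simp
  | x :: t => by
    by_cases hp : p x = true
    · simp only [List.filter_cons, hp, h x hp, Bool.true_or, if_true, Bool.false_eq_true, if_false,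
        List.cons_append]
      exact (filter_or_perm p q h t).cons x
    · simp only [Bool.not_eq_true] at hp
      by_cases hq : q x = true
      · simp only [List.filter_cons, hp, hq, Bool.false_or, Bool.false_eq_true, if_false, if_true]
        exact ((filter_or_perm p q h t).cons x).trans List.perm_middle.symm
      · simp only [Bool.not_eq_true] at hq
        simp only [List.filter_cons, hp, hq, Bool.false_or, Bool.false_eq_true, if_false]
        exact filter_or_perm p q h t

lemma tryAsc_false_of_high (xs : List Int) (i : Int) (h : (xs.length : Int) - 2 ≤ i) :
    pvTryAsc xs i = false := by
  unfold pvTryAsc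
  have h2 : PySem.List.pyGet? xs (i + 2) = none := by
    rw [PySem.List.pyGet?_eq_none_iff]
    intro hr
    rcases hr with ⟨_, hlt⟩
    omega
  rcases hg : PySem.List.pyGet? xs i with _ | a <;>
    rcases hg1 : PySem.List.pyGet? xs (i + 1) with _ | b <;> simp [h2]

lemma tryDesc_false_of_high (xs : List Int) (i : Int) (h : (xs.length : Int) - 2 ≤ i) :
    pvTryDesc xs i = false := by
  unfold pvTryDesc
  have h2 : PySem.List.pyGet? xs (i + 2) = none := by
    rw [PySem.List.pyGet?_eq_none_iff]
    intro hr
    rcases hr with ⟨_, hlt⟩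
    omega
  rcases hg : PySem.List.pyGet? xs i with _ | a <;>
    rcases hg1 : PySem.List.pyGet? xs (i + 1) with _ | b <;> simp [h2]

-- on in-range indices B's test is exactly "A's asc test or A's desc test"
lemma runAt_eq_or (xs : List Int) (i : Int) (h0 : 0 ≤ i) (h2 : i + 2 < (xs.length : Int)) :
    pvRunAt xs i = (pvTryAsc xs i || pvTryDesc xs i) := by
  have g0 : PySem.List.pyGet? xs i = some (PySem.List.pyGetD xs i 0) := by
    rw [PySem.List.pyGet?_eq_some_getElem xs h0 (by omega), PySem.List.pyGetD_eq_getElem xs 0 h0 (by omega)]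
  have g1 : PySem.List.pyGet? xs (i + 1) = some (PySem.List.pyGetD xs (i + 1) 0) := by
    rw [PySem.List.pyGet?_eq_some_getElem xs (by omega) (by omega), PySem.List.pyGetD_eq_getElem xs 0 (by omega) (by omega)]
  have g2 : PySem.List.pyGet? xs (i + 2) = some (PySem.List.pyGetD xs (i + 2) 0) := by
    rw [PySem.List.pyGet?_eq_some_getElem xs (by omega) (by omega), PySem.List.pyGetD_eq_getElem xs 0 (by omega) (by omega)]
  unfold pvRunAt pvTryAsc pvTryDesc
  rw [g0, g1, g2]
  set a := PySem.List.pyGetD xs i 0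
  set b := PySem.List.pyGetD xs (i + 1) 0
  set c := PySem.List.pyGetD xs (i + 2) 0
  apply Bool.eq_iff_iff.mpr
  by_cases hab : a = b + 1 <;> by_cases hab' : a = b - 1 <;>
    simp [hab, hab'] <;> omega

-- the two tests are mutually exclusive
lemma asc_desc_excl (xs : List Int) (i : Int) (h : pvTryAsc xs i = true) : pvTryDesc xs i = false := by
  unfold pvTryAsc at h
  unfold pvTryDesc
  rcases hg : PySem.List.pyGet? xs i with _ | a <;> rw [hg] at h <;>
    rcases hg1 : PySem.List.pyGet? xs (i + 1) with _ | b <;> rw [hg1] at h <;> try simp at h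
  by_cases hab : a = b + 1
  · have : a ≠ b - 1 := by omega
    simp [this]
  · simp [hab] at h

theorem find_consecutive_runs_eq (xs : List Int) :
    find_consecutive_runs xs = find_consecutive_runs_alt xs := by
  unfold find_consecutive_runs find_consecutive_runs_alt
  have hP : pvPayload xs = (PySem.List.pyRange 0 ((xs.length : Int)) 1).filter (fun i => pvTryAsc xs i)
      ++ (PySem.List.pyRange 0 ((xs.length : Int)) 1).filter (fun i => pvTryDesc xs i) := by
    unfold pvPayload
    rw [PySem.List.foldl_append_if_eq_filter, PySem.List.foldl_append_if_eq_filter]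
    simp
  have hR : pvRuns xs = (PySem.List.pyRange 0 ((xs.length : Int) - 2) 1).filter (fun i => pvRunAt xs i) := by
    unfold pvRuns
    rw [PySem.List.foldl_append_if_eq_filter]
    simp
  rw [hP, hR]
  set n : Int := (xs.length : Int) with hn
  -- shrink A's two filters to range(0, n-2)
  rw [filter_pyRange_shrink _ n (fun i h => tryAsc_false_of_high xs i h),
      filter_pyRange_shrink _ n (fun i h => tryDesc_false_of_high xs i h)]
  set r := PySem.List.pyRange 0 (n - 2) 1 with hr
  -- B's filter equals the disjunction filter
  have hB : r.filter (fun i => pvRunAt xs i)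
      = r.filter (fun i => pvTryAsc xs i || pvTryDesc xs i) := by
    apply List.filter_congr
    intro i hi
    rw [hr, PySem.List.mem_pyRange_one] at hi
    exact runAt_eq_or xs i hi.1 (by omega)
  have hperm : (r.filter (fun i => pvRunAt xs i)).Perm
      (r.filter (fun i => pvTryAsc xs i) ++ r.filter (fun i => pvTryDesc xs i)) := by
    rw [hB]
    exact filter_or_perm _ _ (fun i => asc_desc_excl xs i) r
  have hpair : (r.filter (fun i => pvRunAt xs i)).Pairwise (· < ·) :=
    List.Pairwise.sublist List.filter_sublist (PySem.List.pairwise_lt_pyRange_one 0 (n - 2))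
  by_cases hemp : r.filter (fun i => pvTryAsc xs i) ++ r.filter (fun i => pvTryDesc xs i) = []
  · rw [hemp]
    have hB0 : r.filter (fun i => pvRunAt xs i) = [] := (hemp ▸ hperm).eq_nil
    simp [hB0]
  · rw [if_neg hemp]
    have hBne : r.filter (fun i => pvRunAt xs i) ≠ [] := by
      intro hc
      exact hemp (hc ▸ hperm.symm).eq_nil
    rw [if_neg hBne]
    exact PySem.List.sorted_eq_of_perm_of_pairwise_lt _ _ _ hperm hpair

-- ===== VERDICT (by name: the statement is the Claim_ definition above) =====
theorem find_consecutive_runs_spec : Claim_equal_find_consecutive_runs := by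
  intro xs _
  unfold Spec_find_consecutive_runs
  exact find_consecutive_runs_eq xs
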